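-- pv_equiv track=rewrite | github.com/vaibhav-jain-dev/learning-algo | problems/200-must-solve/arrays/08-smallest-difference/similar/01-k-smallest-differences/python_code.py | k_smallest_differences_brute
-- ===== SOURCE A (Python) =====
-- from typing import List, Tuple
--
-- def k_smallest_differences_brute(arr1: List[int], arr2: List[int], k: int) -> List[List[int]]:
--     """
--     Generate all pairs, sort by difference, return first k.
--
--     Simple but inefficient for large arrays.
--     """
--     if not arr1 or not arr2 or k <= 0:
--         return []
--
--     # Generate all pairs with their differences
--     pairs = []
--     for num1 in arr1:
--         for num2 in arr2:
--             diff = abs(num1 - num2)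
--             pairs.append((diff, num1, num2))
--
--     # Sort by difference
--     pairs.sort(key=lambda x: x[0])
--
--     # Return first k pairs
--     return [[num1, num2] for _, num1, num2 in pairs[:k]]
-- ===== SOURCE B (Python) =====
-- def k_smallest_differences_brute(arr1, arr2, k):
--     """Stream all pairs once, keeping only the k best in a small sorted
--     buffer (binary-search insertion, tie-broken by generation index, which
--     matches A's stable sort); no global pair list and no global sort."""
--     if not arr1 or not arr2 or k <= 0:
--         return []
--     best = []  # entries ((diff, idx), n1, n2), sorted ascending, at most k
--     idx = 0
--     for a in arr1:
--         for b in arr2: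
--             d = a - b if a >= b else b - a
--             key = (d, idx)
--             if len(best) == k and best[-1][0] < key:
--                 idx += 1
--                 continue
--             lo, hi = 0, len(best)
--             while lo < hi:
--                 mid = (lo + hi) // 2
--                 if best[mid][0] < key:
--                     lo = mid + 1
--                 else:
--                     hi = mid
--             best.insert(lo, (key, a, b))
--             if len(best) > k:
--                 best.pop()
--             idx += 1
--     return [[n1, n2] for _, n1, n2 in best]
-- ===== Notes on version B (the rewrite author's own statement) =====
-- stated objective: alternative
-- what changed: Instead of materialising all n*m pairs and sorting them, B streams the pairs once and maintains only the k best in a bounded sorted buffer (binary-search insertion, with the generation index as tie-break, which reproduces A's stable sort order exactly).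
import Mathlib
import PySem

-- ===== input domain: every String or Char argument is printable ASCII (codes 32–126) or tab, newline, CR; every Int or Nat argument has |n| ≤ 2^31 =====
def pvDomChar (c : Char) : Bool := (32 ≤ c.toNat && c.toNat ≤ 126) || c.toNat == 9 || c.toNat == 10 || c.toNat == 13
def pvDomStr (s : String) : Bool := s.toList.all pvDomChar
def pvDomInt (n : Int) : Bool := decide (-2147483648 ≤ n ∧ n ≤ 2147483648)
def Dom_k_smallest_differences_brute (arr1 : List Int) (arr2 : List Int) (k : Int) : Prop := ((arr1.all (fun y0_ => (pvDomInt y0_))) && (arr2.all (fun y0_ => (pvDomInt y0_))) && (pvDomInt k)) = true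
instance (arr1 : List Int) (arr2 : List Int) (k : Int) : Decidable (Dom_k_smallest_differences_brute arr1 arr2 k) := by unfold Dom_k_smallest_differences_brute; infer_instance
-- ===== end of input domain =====

-- B streams the pairs once and keeps only the k best in a bounded sorted buffer
-- (binary-search insertion, generation index as tie-break = A's stable sort);
-- A materialises and sorts all n*m pairs.  Return values agree on every input.

-- ===== PORT A =====
def k_smallest_differences_brute (arr1 : List Int) (arr2 : List Int) (k : Int) : List (List Int) :=
  if arr1 = [] ∨ arr2 = [] ∨ k ≤ 0 then []
  else
    -- pairs.append((diff, num1, num2)) inside the two for-loops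
    let pairs := arr1.foldl (fun acc n1 =>
      arr2.foldl (fun acc2 n2 => acc2 ++ [(|n1 - n2|, n1, n2)]) acc) []
    -- pairs.sort(key=lambda x: x[0])  (stable)
    let ps := PySem.List.sorted pairs (fun t => t.1) false
    -- [[num1, num2] for _, num1, num2 in pairs[:k]]
    (PySem.List.slice ps none (some k)).map (fun t => [t.2.1, t.2.2])

-- ===== PORT B =====
-- tuple comparison (d', i') < (d, i)
def pvLt (p q : Int × Int) : Bool := p.1 < q.1 || (p.1 == q.1 && p.2 < q.2)

-- the hand-written 'while lo < hi' binary search of Source B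
def pvBSearch (key : Int × Int) (best : List ((Int × Int) × Int × Int)) (lo hi : Nat) : Nat :=
  if lo < hi then
    let mid := (lo + hi) / 2
    if pvLt (best.getD mid ((0, 0), 0, 0)).1 key then
      pvBSearch key best (mid + 1) hi
    else
      pvBSearch key best lo mid
  else lo
termination_by hi - lo
decreasing_by all_goals omega

-- the body of the inner for-loop of Source B (best.pop() at the end = dropLast)
def pvStep (k : Int) (st : List ((Int × Int) × Int × Int) × Int) (a b : Int) :
    List ((Int × Int) × Int × Int) × Int :=
  let best := st.1
  let i := st.2
  let d := if a ≥ b then a - b else b - a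
  if ((best.length : Int) == k && (match best.getLast? with
      | some f => pvLt f.1 (d, i)
      | none => false)) then
    (best, i + 1)
  else
    let lo := pvBSearch (d, i) best 0 best.length
    let best1 := PySem.List.insert best (lo : Int) ((d, i), a, b)
    let best2 := if k < (best1.length : Int) then best1.dropLast else best1
    (best2, i + 1)

def k_smallest_differences_brute_alt (arr1 : List Int) (arr2 : List Int) (k : Int) : List (List Int) :=
  if arr1 = [] ∨ arr2 = [] ∨ k ≤ 0 then []
  else
    let st := arr1.foldl (fun st a => arr2.foldl (fun st b => pvStep k st a b) st) ([], 0)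
    st.1.map (fun e => [e.2.1, e.2.2])

-- ===== PRECONDITION & SPEC =====
def Spec_k_smallest_differences_brute (arr1 : List Int) (arr2 : List Int) (k : Int) (out : List (List Int)) : Prop := out = k_smallest_differences_brute_alt arr1 arr2 k
instance (arr1 : List Int) (arr2 : List Int) (k : Int) (out : List (List Int)) : Decidable (Spec_k_smallest_differences_brute arr1 arr2 k out) := by unfold Spec_k_smallest_differences_brute; infer_instance

-- ===== CLAIM (what is proved, stated in full; the proofs are below) =====
def Claim_equal_k_smallest_differences_brute : Prop := ∀ (arr1 : List Int) (arr2 : List Int) (k : Int), Dom_k_smallest_differences_brute arr1 arr2 k → Spec_k_smallest_differences_brute arr1 arr2 k (k_smallest_differences_brute arr1 arr2 k)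

-- ===== LEMMAS AND PROOFS =====

-- entries of B's buffer: ((diff, generation index), num1, num2)
def pvG (e : (Int × Int) × Int × Int) : Int × Int × Int := (e.1.1, e.2.1, e.2.2)

-- stable insertion used by Python's sort on the B-side entries, keyed by (diff, idx)
def pvInsL (e : (Int × Int) × Int × Int) (s : List ((Int × Int) × Int × Int)) :
    List ((Int × Int) × Int × Int) :=
  PySem.List.insertBy (fun x y => pvLt x.1 y.1) e s

-- linear insertion position: number of leading entries strictly below key
def pvPos (key : Int × Int) (s : List ((Int × Int) × Int × Int)) : Nat :=
  (s.takeWhile (fun f => pvLt f.1 key)).length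

-- the pair stream with generation indices attached
def pvKeyed : Int → List (Int × Int) → List ((Int × Int) × Int × Int)
  | _, [] => []
  | i, (a, b) :: r => ((|a - b|, i), a, b) :: pvKeyed (i + 1) r

theorem pvLt_iff (p q : Int × Int) : pvLt p q = true ↔ (p.1 < q.1 ∨ (p.1 = q.1 ∧ p.2 < q.2)) := by
  simp [pvLt]

theorem pvLt_trans {p q r : Int × Int} (h1 : pvLt p q = true) (h2 : pvLt q r = true) :
    pvLt p r = true := by
  obtain ⟨p1, p2⟩ := p; obtain ⟨q1, q2⟩ := q; obtain ⟨r1, r2⟩ := r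
  simp only [pvLt_iff] at *; omega

theorem pvLt_total {p q : Int × Int} (hne : p ≠ q) (h : pvLt p q = false) : pvLt q p = true := by
  obtain ⟨p1, p2⟩ := p; obtain ⟨q1, q2⟩ := q
  simp only [pvLt_iff] at *
  rw [Bool.eq_false_iff, ne_eq, pvLt_iff] at h
  simp at h hne ⊢
  omega

theorem insertBy_nil {α : Type} (before : α → α → Bool) (x : α) :
    PySem.List.insertBy before x [] = [x] := rfl

theorem insertBy_cons {α : Type} (before : α → α → Bool) (x y : α) (ys : List α) :
    PySem.List.insertBy before x (y :: ys) =
      if before x y then x :: y :: ys else y :: PySem.List.insertBy before x ys := rfl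

theorem pvPos_getD (s : List ((Int × Int) × Int × Int)) (key : Int × Int)
    (hs : s.Pairwise (fun e f => pvLt e.1 f.1 = true)) (j : Nat) (hj : j < s.length) :
    (pvLt (s.getD j ((0,0),0,0)).1 key = true ↔ j < pvPos key s) := by
  induction s generalizing j with
  | nil => simp at hj
  | cons f t ih =>
    rw [List.pairwise_cons] at hs
    by_cases hf : pvLt f.1 key = true
    · cases j with
      | zero => simp [pvPos, hf]
      | succ j =>
        have := ih hs.2 j (by simpa using hj)
        simpa [pvPos, List.takeWhile_cons, hf, Nat.succ_lt_succ_iff] using this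
    · cases j with
      | zero => simp [pvPos, hf]
      | succ j =>
        have hjt : j < t.length := by simpa using hj
        simp only [pvPos, List.takeWhile_cons, if_neg hf, List.length_nil]
        constructor
        · intro hlt
          exfalso
          rw [List.getD_cons_succ, List.getD_eq_getElem t _ hjt] at hlt
          exact hf (pvLt_trans (hs.1 _ (List.getElem_mem hjt)) hlt)
        · omega

theorem pvLt_asymm {p q : Int × Int} (h : pvLt p q = true) : pvLt q p = false := by
  obtain ⟨p1, p2⟩ := p; obtain ⟨q1, q2⟩ := q
  rw [pvLt_iff] at h
  rw [Bool.eq_false_iff, ne_eq, pvLt_iff]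
  simp only [not_or, not_and, not_lt]
  constructor <;> intros <;> omega

theorem pvInsL_eq (e : (Int × Int) × Int × Int) (s : List ((Int × Int) × Int × Int))
    (h : ∀ f ∈ s, f.1 ≠ e.1) :
    pvInsL e s = s.take (pvPos e.1 s) ++ e :: s.drop (pvPos e.1 s) := by
  induction s with
  | nil => simp [pvInsL, insertBy_nil, pvPos]
  | cons f t ih =>
    simp only [pvInsL, insertBy_cons]
    by_cases hef : pvLt e.1 f.1 = true
    · have hfe : pvLt f.1 e.1 = false := pvLt_asymm hef
      simp [hef, pvPos, hfe]
    · have hfe : pvLt f.1 e.1 = true :=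
        pvLt_total (Ne.symm (h f (by simp))) (Bool.eq_false_iff.mpr hef)
      have ih' := ih (fun g hg => h g (by simp [hg]))
      simp only [pvInsL] at ih'
      simp [hef, pvPos, hfe, ih']

theorem pvInsL_pairwise (e : (Int × Int) × Int × Int) (s : List ((Int × Int) × Int × Int))
    (hs : s.Pairwise (fun x y => pvLt x.1 y.1 = true)) (h : ∀ f ∈ s, f.1 ≠ e.1) :
    (pvInsL e s).Pairwise (fun x y => pvLt x.1 y.1 = true) := by
  induction s with
  | nil => exact List.pairwise_singleton _ _
  | cons f t ih =>
    rw [List.pairwise_cons] at hs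
    simp only [pvInsL, insertBy_cons]
    by_cases hef : pvLt e.1 f.1 = true
    · rw [if_pos hef, List.pairwise_cons]
      refine ⟨?_, List.pairwise_cons.mpr hs⟩
      intro y hy
      rcases List.mem_cons.mp hy with rfl | hy'
      · exact hef
      · exact pvLt_trans hef (hs.1 y hy')
    · have hfe : pvLt f.1 e.1 = true :=
        pvLt_total (Ne.symm (h f (by simp))) (Bool.eq_false_iff.mpr hef)
      rw [if_neg hef, List.pairwise_cons]
      refine ⟨?_, ?_⟩
      · intro y hy
        rcases (PySem.List.mem_insertBy _ _ _ _).mp hy with rfl | hy'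
        · exact hfe
        · exact hs.1 y hy'
      · exact ih hs.2 (fun g hg => h g (by simp [hg]))

theorem pvLt_eq_of_snd_lt {p q : Int × Int} (h : q.2 < p.2) :
    pvLt p q = decide (p.1 < q.1) := by
  obtain ⟨p1, p2⟩ := p; obtain ⟨q1, q2⟩ := q
  simp only [pvLt]
  rcases lt_trichotomy p1 q1 with h1 | h1 | h1 <;> simp_all <;> omega

theorem pvInsL_map (e : (Int × Int) × Int × Int) (s : List ((Int × Int) × Int × Int))
    (h : ∀ f ∈ s, f.1.2 < e.1.2) :
    (pvInsL e s).map pvG =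
      PySem.List.insertBy (fun u v => decide (u.1 < v.1)) (pvG e) (s.map pvG) := by
  induction s with
  | nil => simp [pvInsL, insertBy_nil]
  | cons f t ih =>
    have hb : pvLt e.1 f.1 = decide (e.1.1 < f.1.1) := pvLt_eq_of_snd_lt (h f (by simp))
    have ih' := ih (fun g hg => h g (by simp [hg]))
    simp only [pvInsL, insertBy_cons, List.map_cons] at *
    rw [hb]
    by_cases hc : e.1.1 < f.1.1
    · simp [hc, pvG]
    · simp [hc, pvG, ih']

theorem pvPos_take (key : Int × Int) (s : List ((Int × Int) × Int × Int)) (K : Nat) :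
    pvPos key (s.take K) = min (pvPos key s) K := by
  induction s generalizing K with
  | nil => simp [pvPos]
  | cons f t ih =>
    cases K with
    | zero => simp [pvPos]
    | succ K =>
      simp only [List.take_succ_cons, pvPos, List.takeWhile_cons]
      by_cases hf : pvLt f.1 key = true
      · simp only [hf, if_true, List.length_cons]
        have := ih K
        simp only [pvPos] at this
        omega
      · simp [hf]

theorem pvBSearch_eq (key : Int × Int) (s : List ((Int × Int) × Int × Int))
    (hs : s.Pairwise (fun e f => pvLt e.1 f.1 = true)) (lo hi : Nat)
    (h1 : lo ≤ pvPos key s) (h2 : pvPos key s ≤ hi) (h3 : hi ≤ s.length) :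
    pvBSearch key s lo hi = pvPos key s := by
  fun_induction pvBSearch key s lo hi with
  | case1 lo hi hlt mid hcond ih =>
    have hmid : mid < s.length := by omega
    rw [List.getD_eq_getElem s _ hmid] at hcond
    have := (pvPos_getD s key hs mid hmid).mp (by rwa [List.getD_eq_getElem s _ hmid])
    exact ih (by omega) h2 h3
  | case2 lo hi hlt mid hcond ih =>
    have hmid : mid < s.length := by omega
    rw [List.getD_eq_getElem s _ hmid] at hcond
    have hnot : ¬ mid < pvPos key s := by
      intro hc
      have := (pvPos_getD s key hs mid hmid).mpr hc
      rw [List.getD_eq_getElem s _ hmid] at this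
      simp [this] at hcond
    exact ih h1 (by omega) (by omega)
  | case3 lo hi hge => omega

theorem pvStep_eq (k : Int) (hk : 0 < k) (s : List ((Int × Int) × Int × Int))
    (hs : s.Pairwise (fun e f => pvLt e.1 f.1 = true)) (i a b : Int)
    (hidx : ∀ f ∈ s, f.1.2 < i) :
    pvStep k (s.take k.toNat, i) a b =
      ((pvInsL ((|a - b|, i), a, b) s).take k.toNat, i + 1) := by
  have habs : (if a ≥ b then a - b else b - a) = |a - b| := by
    by_cases hab : b ≤ a
    · rw [if_pos hab, abs_of_nonneg (by omega)]
    · rw [if_neg (by omega), abs_of_neg (by omega)]; ring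
  set K := k.toNat with hKdef
  have hKk : (K : Int) = k := Int.toNat_of_nonneg (by omega)
  have hKpos : 1 ≤ K := by omega
  set e : (Int × Int) × Int × Int := ((|a - b|, i), a, b) with he
  set p := pvPos e.1 s with hp
  have hple : p ≤ s.length := by
    simpa [hp, pvPos] using List.Sublist.length_le (List.takeWhile_sublist _)
  have hne : ∀ f ∈ s, f.1 ≠ e.1 := by
    intro f hf hq
    have h2 := hidx f hf
    rw [hq, he] at h2
    exact absurd h2 (lt_irrefl _)
  have hins := pvInsL_eq e s hne
  have htp : (s.take K).Pairwise (fun x y => pvLt x.1 y.1 = true) :=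
    List.Pairwise.sublist (List.take_sublist _ _) hs
  have hlt : (s.take K).length = min K s.length := by simp
  have hpt : pvPos e.1 (s.take K) = min p K := by rw [pvPos_take, hp]
  simp only [pvStep, habs, ← he]
  by_cases hKs : K ≤ s.length
  · -- buffer is full: (s.take K).length = K
    have hlen : (s.take K).length = K := by omega
    have hKm1 : K - 1 < (s.take K).length := by omega
    have hlast : (s.take K).getLast? = some ((s.take K)[K - 1]'hKm1) := by
      rw [List.getLast?_eq_getElem?, hlen, List.getElem?_eq_getElem hKm1]
    have hgetKm1 : (s.take K)[K - 1]'hKm1 = s[K - 1]'(by omega) := List.getElem_take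
    by_cases hKp : K ≤ p
    · -- every element of the buffer is below the key: skip
      have hcond : pvLt (s[K - 1]'(by omega)).1 e.1 = true := by
        have := (pvPos_getD s e.1 hs (K - 1) (by omega)).mpr (by omega)
        rwa [List.getD_eq_getElem s _ (by omega)] at this
      have hcond' : pvLt (s[K - 1]'(by omega)).1 (|a - b|, i) = true := hcond
      rw [if_pos (by
        rw [hlast, hgetKm1]
        simp [hlen, hKk, hcond'])]
      rw [hins, List.take_append]
      have hltp : (s.take p).length = p := by simp; omega
      rw [hltp, List.take_take]
      have : K - p = 0 := by omega
      simp [this]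
      rw [← hp]
      omega
    · -- key belongs inside the buffer: insert and drop the last element
      have hcond : pvLt (s[K - 1]'(by omega)).1 e.1 = false := by
        rw [Bool.eq_false_iff, ne_eq]
        intro hc
        have := (pvPos_getD s e.1 hs (K - 1) (by omega)).mp (by
          rwa [List.getD_eq_getElem s _ (by omega)])
        omega
      have hcond' : pvLt (s[K - 1]'(by omega)).1 (|a - b|, i) = false := hcond
      rw [if_neg (by
        rw [hlast, hgetKm1]
        simp [hcond'])]
      have hbs : pvBSearch (|a - b|, i) (s.take K) 0 K = p := by
        have h5 := pvBSearch_eq e.1 (s.take K) htp 0 ((s.take K).length)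
          (by omega) (by rw [hpt, hlen]; omega) (le_refl _)
        rw [hpt, hlen] at h5
        exact h5.trans (by omega)
      rw [hlen, hbs, PySem.List.insert_natCast _ _ _ (by omega)]
      have hlen1 : (List.take p (s.take K) ++ e :: List.drop p (s.take K)).length = K + 1 :=
        PySem.List.length_take_append_cons_drop _ _ _ |>.trans (by omega)
      rw [if_pos (by rw [hlen1]; omega)]
      rw [List.dropLast_eq_take, hlen1]
      simp only [Nat.add_sub_cancel, Prod.mk.injEq]
      rw [← hp] at hins
      refine ⟨?_, trivial⟩
      have hltp : (List.take p s).length = p := by simp; omega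
      have h6 : ∀ X : List ((Int × Int) × Int × Int),
          List.take K (List.take p s ++ e :: X) = List.take p s ++ e :: X.take (K - p - 1) := by
        intro X
        rw [List.take_append, hltp, List.take_take, Nat.min_eq_right (by omega)]
        congr 1
        have h7 : K - p = (K - p - 1) + 1 := by omega
        rw [h7, List.take_succ_cons]
        congr 2
      rw [hins, List.take_take, Nat.min_eq_left (by omega), List.drop_take, h6, h6,
        List.take_take, Nat.min_eq_left (by omega)]
  · -- buffer holds everything: s.take K = s
    have hts : s.take K = s := List.take_of_length_le (by omega)
    rw [if_neg (by
      rw [hts]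
      simp only [Bool.and_eq_true, beq_iff_eq]
      intro hc
      omega)]
    have hbs : pvBSearch (|a - b|, i) (s.take K) 0 (s.take K).length = p := by
      have h5 := pvBSearch_eq e.1 (s.take K) htp 0 ((s.take K).length)
        (by omega) (by rw [hpt, hlt]; omega) (le_refl _)
      rw [hpt] at h5
      exact h5.trans (by omega)
    rw [hbs, hts, PySem.List.insert_natCast _ _ _ hple, ← hins]
    have hlen1 : (pvInsL e s).length = s.length + 1 := by
      rw [hins]; exact PySem.List.length_take_append_cons_drop _ _ _
    rw [if_neg (by rw [hlen1]; omega)]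
    rw [List.take_of_length_le (by omega)]

theorem pvFoldA (ps : List (Int × Int)) : ∀ (i : Int) (s : List ((Int × Int) × Int × Int)),
    (∀ f ∈ s, f.1.2 < i) →
    ((pvKeyed i ps).foldl (fun acc e => pvInsL e acc) s).map pvG =
      (ps.map (fun p => (|p.1 - p.2|, p.1, p.2))).foldl
        (fun acc x => PySem.List.insertBy (fun u v => decide (u.1 < v.1)) x acc) (s.map pvG) := by
  induction ps with
  | nil => intro i s h; simp [pvKeyed]
  | cons q r ih =>
    intro i s h
    obtain ⟨a, b⟩ := q
    simp only [pvKeyed, List.foldl_cons, List.map_cons]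
    have hb : ∀ f ∈ pvInsL ((|a - b|, i), a, b) s, f.1.2 < i + 1 := by
      intro f hf
      simp only [pvInsL] at hf
      rcases (PySem.List.mem_insertBy _ _ _ _).mp hf with rfl | hf'
      · simp
      · exact lt_trans (h f hf') (by omega)
    rw [ih (i + 1) _ hb, pvInsL_map ((|a - b|, i), a, b) s (fun f hf => h f hf)]
    rfl

theorem pvFoldB (k : Int) (hk : 0 < k) (ps : List (Int × Int)) :
    ∀ (i : Int) (s : List ((Int × Int) × Int × Int)),
    s.Pairwise (fun e f => pvLt e.1 f.1 = true) → (∀ f ∈ s, f.1.2 < i) →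
    ps.foldl (fun st p => pvStep k st p.1 p.2) (s.take k.toNat, i) =
      (((pvKeyed i ps).foldl (fun acc e => pvInsL e acc) s).take k.toNat, i + ps.length) := by
  induction ps with
  | nil => intro i s _ _; simp [pvKeyed]
  | cons q r ih =>
    intro i s hs h
    obtain ⟨a, b⟩ := q
    simp only [pvKeyed, List.foldl_cons]
    rw [pvStep_eq k hk s hs i a b h]
    have hne : ∀ f ∈ s, f.1 ≠ ((|a - b|, i), a, b).1 := by
      intro f hf hq
      have h2 := h f hf
      rw [hq] at h2
      exact absurd h2 (lt_irrefl _)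
    have hb : ∀ f ∈ pvInsL ((|a - b|, i), a, b) s, f.1.2 < i + 1 := by
      intro f hf
      simp only [pvInsL] at hf
      rcases (PySem.List.mem_insertBy _ _ _ _).mp hf with rfl | hf'
      · simp
      · exact lt_trans (h f hf') (by omega)
    rw [ih (i + 1) _ (pvInsL_pairwise _ _ hs hne) hb]
    simp only [Prod.mk.injEq, List.length_cons]
    refine ⟨trivial, ?_⟩
    push_cast
    ring

-- ===== VERDICT (by name: the statement is the Claim_ definition above) =====
theorem k_smallest_differences_brute_spec : Claim_equal_k_smallest_differences_brute := by
  intro arr1 arr2 k _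
  unfold Spec_k_smallest_differences_brute k_smallest_differences_brute k_smallest_differences_brute_alt
  by_cases hg : arr1 = [] ∨ arr2 = [] ∨ k ≤ 0
  · simp [hg]
  · rw [if_neg hg, if_neg hg]
    dsimp only
    have hk : 0 < k := by
      rw [not_or, not_or] at hg
      omega
    have hinner : ∀ (acc : List (Int × Int × Int)) (n1 : Int),
        arr2.foldl (fun acc2 n2 => acc2 ++ [(|n1 - n2|, n1, n2)]) acc =
          acc ++ arr2.map (fun n2 => (|n1 - n2|, n1, n2)) := fun acc n1 =>
      PySem.List.foldl_append_singleton_eq_map _ _ _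
    have hpairs : arr1.foldl (fun acc n1 =>
        arr2.foldl (fun acc2 n2 => acc2 ++ [(|n1 - n2|, n1, n2)]) acc) [] =
        (arr1.flatMap (fun a => arr2.map (fun b => (a, b)))).map
          (fun p => (|p.1 - p.2|, p.1, p.2)) := by
      simp only [hinner]
      rw [PySem.List.foldl_append_eq_flatMap]
      simp [List.map_flatMap, List.map_map, Function.comp_def]
    have hA := pvFoldA (arr1.flatMap (fun a => arr2.map (fun b => (a, b)))) 0 []
      (by intro f hf; simp at hf)
    have hB := pvFoldB k hk (arr1.flatMap (fun a => arr2.map (fun b => (a, b)))) 0 []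
      (by simp) (by intro f hf; simp at hf)
    simp only [List.map_nil, List.take_nil] at hA hB
    rw [hpairs, PySem.List.sorted_eq_foldl_insertBy, ← hA,
      PySem.List.slice_to _ (by omega : (0:Int) ≤ k)]
    have hBfold : arr1.foldl (fun st a => arr2.foldl (fun st b => pvStep k st a b) st) ([], 0) =
        (arr1.flatMap (fun a => arr2.map (fun b => (a, b)))).foldl
          (fun st p => pvStep k st p.1 p.2) ([], 0) := by
      rw [List.foldl_flatMap]
      simp [List.foldl_map]
    rw [hBfold, hB]
    simp only [List.map_take, List.map_map]
    rfl
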